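-- pv_equiv track=rewrite | github.com/Oxbrimp/Encryption-Test | classes/spn.py | apply_sbox
-- ===== SOURCE A (Python) =====
-- SBOX     = [0x6,0x4,0xC,0x5,0x0,0x7,0x2,0xE,
--             0x1,0xF,0x3,0xD,0x8,0xA,0x9,0xB]
--
-- def apply_sbox(x):
--     out = 0
--     for byte_i in range(8):
--         b  = (x >> (8*byte_i)) & 0xFF
--         hi, lo = b>>4, b&0xF
--         hi2, lo2 = SBOX[hi], SBOX[lo]
--         out |= (hi2<<4 | lo2) << (8*byte_i)
--     return out
-- ===== SOURCE B (Python) =====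
-- SBOX     = [0x6,0x4,0xC,0x5,0x0,0x7,0x2,0xE,
--             0x1,0xF,0x3,0xD,0x8,0xA,0x9,0xB]
--
-- def apply_sbox(x):
--     # Horner-style: walk the 16 nibbles from the most significant down,
--     # shifting the accumulator and appending the substituted nibble.
--     out = 0
--     for i in range(15, -1, -1):
--         out = (out << 4) | SBOX[(x >> (4*i)) & 0xF]
--     return out
-- ===== Notes on version B (the rewrite author's own statement) =====
-- stated objective: alternative
-- what changed: Replaces the byte-by-byte loop with hi/lo nibble splitting and LSB-first OR-accumulation by a single MSB-first Horner pass over the 16 nibbles ((out << 4) | SBOX[nibble]).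
import Mathlib
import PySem

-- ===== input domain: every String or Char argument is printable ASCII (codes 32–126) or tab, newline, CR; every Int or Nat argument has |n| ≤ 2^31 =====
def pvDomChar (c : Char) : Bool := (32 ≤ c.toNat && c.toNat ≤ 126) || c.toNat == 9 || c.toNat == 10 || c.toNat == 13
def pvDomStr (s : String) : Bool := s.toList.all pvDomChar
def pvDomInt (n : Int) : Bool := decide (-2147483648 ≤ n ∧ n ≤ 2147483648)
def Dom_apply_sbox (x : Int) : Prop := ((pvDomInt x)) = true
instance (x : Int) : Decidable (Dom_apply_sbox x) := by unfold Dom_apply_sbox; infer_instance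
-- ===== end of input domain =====

-- B replaces A's byte loop (hi/lo split, LSB-first OR-accumulation) by an MSB-first
-- Horner pass over the 16 nibbles; same return value, no side effects.

-- ===== PORT A =====
def SBOX : List Int := [0x6, 0x4, 0xC, 0x5, 0x0, 0x7, 0x2, 0xE,
                        0x1, 0xF, 0x3, 0xD, 0x8, 0xA, 0x9, 0xB]

-- one iteration of A's `for byte_i in range(8)` body; SBOX[hi]/SBOX[lo] are always
-- in range (hi, lo ∈ [0,16)), so the `.getD 0` default of pyGet? is never taken
def stepA (x out byte_i : Int) : Int :=
  let b := PySem.Int.band (x >>> (8 * byte_i).toNat) 0xFF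
  let hi := b >>> (4 : Nat)
  let lo := PySem.Int.band b 0xF
  let hi2 := (PySem.List.pyGet? SBOX hi).getD 0
  let lo2 := (PySem.List.pyGet? SBOX lo).getD 0
  PySem.Int.bor out ((PySem.Int.bor (hi2 <<< (4 : Nat)) lo2) <<< (8 * byte_i).toNat)

def apply_sbox (x : Int) : Int :=
  (PySem.List.pyRange 0 8).foldl (stepA x) 0

-- ===== PORT B =====
-- one iteration of B's `for i in range(15, -1, -1)` body (index always in range, as above)
def stepB (x out i : Int) : Int :=
  PySem.Int.bor (out <<< (4 : Nat))
    ((PySem.List.pyGet? SBOX (PySem.Int.band (x >>> (4 * i).toNat) 0xF)).getD 0)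

def apply_sbox_alt (x : Int) : Int :=
  (PySem.List.pyRange 15 (-1) (-1)).foldl (stepB x) 0

-- ===== PRECONDITION & SPEC =====
def Spec_apply_sbox (x : Int) (out : Int) : Prop := out = apply_sbox_alt x
instance (x : Int) (out : Int) : Decidable (Spec_apply_sbox x out) := by unfold Spec_apply_sbox; infer_instance

-- ===== CLAIM (what is proved, stated in full; the proofs are below) =====
def Claim_equal_apply_sbox : Prop := ∀ (x : Int), Dom_apply_sbox x → Spec_apply_sbox x (apply_sbox x)

-- ===== LEMMAS AND PROOFS =====

-- Nat-level substitution table and the value both programs compute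
def sN (m : Nat) : Nat := [6, 4, 12, 5, 0, 7, 2, 14, 1, 15, 3, 13, 8, 10, 9, 11].getD m 0

-- the i-th nibble of x (Python semantics: floor shift, then mask)
def nibN (x : Int) (i : Nat) : Nat := ((x / 2 ^ (4 * i)) % 16).toNat

-- value of the low n substituted nibbles
def valN (x : Int) (n : Nat) : Nat := ∑ j ∈ Finset.range n, sN (nibN x j) * 2 ^ (4 * j)

lemma sN_lt (m : Nat) : sN m < 16 := by
  rcases Nat.lt_or_ge m 16 with h | h
  · interval_cases m <;> decide
  · simp [sN, h]

lemma nibN_lt (x : Int) (i : Nat) : nibN x i < 16 := by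
  have := Int.emod_nonneg (x / 2 ^ (4 * i)) (by norm_num : (16:Int) ≠ 0)
  have := Int.emod_lt_of_pos (x / 2 ^ (4 * i)) (by norm_num : (0:Int) < 16)
  unfold nibN; omega

-- Python's `&` with an all-ones mask is `%` by the corresponding power of two
lemma band_255 (a : Int) : PySem.Int.band a 255 = a % 256 := by
  rcases le_or_gt 0 a with h | h
  · rw [PySem.Int.band_of_nonneg h (by norm_num)]
    have : a.toNat &&& (255:Int).toNat = a.toNat % 256 := Nat.and_two_pow_sub_one_eq_mod a.toNat 8
    rw [this]; omega
  · have hb : ¬ (0:Int) ≤ a := by omega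
    simp only [PySem.Int.band, if_neg hb, if_pos (by norm_num : (0:Int) ≤ 255)]
    have : (255:Int).toNat &&& (-a - 1).toNat = (-a - 1).toNat % 256 := by
      rw [Nat.and_comm]; exact Nat.and_two_pow_sub_one_eq_mod (-a - 1).toNat 8
    rw [this]; omega

lemma band_15 (a : Int) : PySem.Int.band a 15 = a % 16 := by
  rcases le_or_gt 0 a with h | h
  · rw [PySem.Int.band_of_nonneg h (by norm_num)]
    have : a.toNat &&& (15:Int).toNat = a.toNat % 16 := Nat.and_two_pow_sub_one_eq_mod a.toNat 4
    rw [this]; omega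
  · have hb : ¬ (0:Int) ≤ a := by omega
    simp only [PySem.Int.band, if_neg hb, if_pos (by norm_num : (0:Int) ≤ 15)]
    have : (15:Int).toNat &&& (-a - 1).toNat = (-a - 1).toNat % 16 := by
      rw [Nat.and_comm]; exact Nat.and_two_pow_sub_one_eq_mod (-a - 1).toNat 4
    rw [this]; omega

-- OR of a shifted value with a small value is addition (disjoint bit ranges)
lemma lor_shl_eq_add (a b k : Nat) (h : b < 2 ^ k) : a <<< k ||| b = a <<< k + b := by
  apply Nat.eq_of_testBit_eq
  intro i
  have hadd : a <<< k + b = 2 ^ k * a + b := by rw [Nat.shiftLeft_eq]; ring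
  rw [Nat.testBit_or, hadd, Nat.testBit_two_pow_mul_add a h i, Nat.testBit_shiftLeft]
  rcases Nat.lt_or_ge i k with hik | hik
  · simp [hik, Nat.not_le.mpr hik]
  · have h3 : b.testBit i = false :=
      Nat.testBit_lt_two_pow (lt_of_lt_of_le h (Nat.pow_le_pow_right (by norm_num) hik))
    simp [hik, Nat.not_lt.mpr hik, h3]

lemma natCast_shl (n k : Nat) : ((n : Int) <<< k) = ((n <<< k : Nat) : Int) := by
  simp [Int.shiftLeft_eq, Nat.shiftLeft_eq]

-- the Int-side table lookup agrees with the Nat-side table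
lemma lookup_eq (m : Nat) (h : m < 16) :
    (PySem.List.pyGet? SBOX (m : Int)).getD 0 = ((sN m : Nat) : Int) := by
  interval_cases m <;> decide

lemma valN_lt (x : Int) (n : Nat) : valN x n < 2 ^ (4 * n) := by
  induction n with
  | zero => simp [valN]
  | succ n ih =>
    have hs := sN_lt (nibN x n)
    have : valN x (n + 1) = valN x n + sN (nibN x n) * 2 ^ (4 * n) := by
      simp [valN, Finset.sum_range_succ]
    rw [this]
    have h1 : sN (nibN x n) * 2 ^ (4 * n) ≤ 15 * 2 ^ (4 * n) :=
      Nat.mul_le_mul_right _ (by omega)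
    have h2 : (2:Nat) ^ (4 * (n + 1)) = 16 * 2 ^ (4 * n) := by ring
    omega

-- one byte step of A adds the two corresponding substituted nibbles
lemma stepA_eq (x : Int) (n : Nat) :
    stepA x ((valN x (2 * n) : Nat) : Int) ((n : Nat) : Int) = ((valN x (2 * n + 2) : Nat) : Int) := by
  have htn : ((8 * (n : Int)).toNat) = 8 * n := by omega
  have hc8 : ((2 ^ (8 * n) : Nat) : Int) = 2 ^ (8 * n) := by norm_cast
  have hc4 : ((2 ^ (4 : Nat) : Nat) : Int) = 16 := by norm_num
  set a : Int := x / 2 ^ (8 * n) with ha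
  have hb : PySem.Int.band (x >>> (8 * ((n : Nat) : Int)).toNat) 0xFF = a % 256 := by
    rw [htn, Int.shiftRight_eq_div_pow, band_255, hc8]
  have hdiv16 : x / 2 ^ (8 * n + 4) = a / 16 := by
    rw [ha, pow_add, ← Int.ediv_ediv_of_nonneg (by positivity)]; norm_num
  have hhiN : (a % 256) >>> (4 : Nat) = ((nibN x (2 * n + 1) : Nat) : Int) := by
    rw [Int.shiftRight_eq_div_pow, hc4]
    unfold nibN
    rw [show 4 * (2 * n + 1) = 8 * n + 4 by ring, hdiv16]
    omega
  have hloN : PySem.Int.band (a % 256) 0xF = ((nibN x (2 * n) : Nat) : Int) := by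
    rw [band_15]
    unfold nibN
    rw [show 4 * (2 * n) = 8 * n by ring, ← ha]
    omega
  show PySem.Int.bor _ _ = _
  rw [hb, hhiN, hloN, lookup_eq _ (nibN_lt x _), lookup_eq _ (nibN_lt x _)]
  rw [natCast_shl,
      PySem.Int.bor_of_nonneg (Int.natCast_nonneg _) (Int.natCast_nonneg _)]
  simp only [Int.toNat_natCast]
  rw [htn, natCast_shl,
      PySem.Int.bor_of_nonneg (Int.natCast_nonneg _) (Int.natCast_nonneg _)]
  simp only [Int.toNat_natCast]
  norm_cast
  -- now a pure Nat identity
  rw [lor_shl_eq_add (sN (nibN x (2 * n + 1))) (sN (nibN x (2 * n))) 4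
    (lt_of_lt_of_le (sN_lt _) (by norm_num))]
  have hv := valN_lt x (2 * n)
  rw [Nat.lor_comm,
      lor_shl_eq_add _ _ (8 * n) (lt_of_lt_of_le hv (by rw [show 4 * (2 * n) = 8 * n by ring]))]
  simp only [valN, Finset.sum_range_succ, Nat.shiftLeft_eq]
  ring

-- A's fold over the first n bytes computes the low 2n substituted nibbles
lemma foldA (x : Int) (n : Nat) (h : n ≤ 8) :
    ((List.range n).map (Nat.cast : Nat → Int)).foldl (stepA x) 0 = ((valN x (2 * n) : Nat) : Int) := by
  induction n with
  | zero => simp [valN]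
  | succ n ih =>
    rw [List.range_succ, List.map_append, List.foldl_append, ih (by omega)]
    simpa [show 2 * n + 2 = 2 * (n + 1) by ring] using stepA_eq x n

-- one nibble step of B is a Horner step
lemma stepB_eq (x : Int) (o n : Nat) :
    stepB x ((o : Nat) : Int) ((n : Nat) : Int) = ((16 * o + sN (nibN x n) : Nat) : Int) := by
  have htn : ((4 * (n : Int)).toNat) = 4 * n := by omega
  have hc : ((2 ^ (4 * n) : Nat) : Int) = 2 ^ (4 * n) := by norm_cast
  have hnib : PySem.Int.band (x >>> (4 * ((n : Nat) : Int)).toNat) 0xF = ((nibN x n : Nat) : Int) := by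
    rw [htn, Int.shiftRight_eq_div_pow, band_15, hc]
    unfold nibN
    generalize x / (2 : Int) ^ (4 * n) = y
    omega
  show PySem.Int.bor _ _ = _
  rw [hnib, lookup_eq _ (nibN_lt x n), natCast_shl,
      PySem.Int.bor_of_nonneg (Int.natCast_nonneg _) (Int.natCast_nonneg _)]
  simp only [Int.toNat_natCast]
  norm_cast
  rw [lor_shl_eq_add _ _ 4 (lt_of_lt_of_le (sN_lt _) (by norm_num)), Nat.shiftLeft_eq]
  ring

-- B's fold, started at accumulator o, over nibbles n-1 … 0 (MSB first)
lemma foldB (x : Int) (n : Nat) : ∀ (o : Nat),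
    ((List.range n).reverse.map (Nat.cast : Nat → Int)).foldl (stepB x) ((o : Nat) : Int)
      = ((o * 2 ^ (4 * n) + valN x n : Nat) : Int) := by
  induction n with
  | zero => intro o; simp [valN]
  | succ n ih =>
    intro o
    rw [List.range_succ, List.reverse_append, List.reverse_singleton, List.singleton_append,
        List.map_cons, List.foldl_cons, stepB_eq, ih]
    congr 1
    have : valN x (n + 1) = valN x n + sN (nibN x n) * 2 ^ (4 * n) := by
      simp [valN, Finset.sum_range_succ]
    rw [this]
    ring

lemma rangeA : PySem.List.pyRange 0 8 = ((List.range 8).map (Nat.cast : Nat → Int)) := by decide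

lemma rangeB : PySem.List.pyRange 15 (-1) (-1) = ((List.range 16).reverse.map (Nat.cast : Nat → Int)) := by
  decide

lemma foldB0 (x : Int) :
    ((List.range 16).reverse.map (Nat.cast : Nat → Int)).foldl (stepB x) 0 = ((valN x 16 : Nat) : Int) := by
  have h := foldB x 16 0
  rw [Nat.cast_zero, Nat.zero_mul, Nat.zero_add] at h
  exact h

-- ===== VERDICT (by name: the statement is the Claim_ definition above) =====
theorem apply_sbox_spec : Claim_equal_apply_sbox := by
  intro x _
  unfold Spec_apply_sbox apply_sbox apply_sbox_alt
  rw [rangeA, rangeB, foldA x 8 (by norm_num), foldB0]
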